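-- pv_equiv track=rewrite | github.com/Paralipupa/api_emulator | src/config_loader.py | _match_path_with_params
-- ===== SOURCE A (Python) =====
-- def _match_path_with_params(route_path: str, request_path: str) -> bool:
--     """
--     Сравнивает путь запроса с путем из конфигурации, учитывая параметры в фигурных скобках
--
--     Args:
--         route_path: путь из конфигурации (например, /ratings/v1/answer/{reviewId})
--         request_path: путь из запроса (например, /ratings/v1/answer/112)
--
--     Returns:
--         bool: True если пути совпадают с учетом параметров
--     """
--     # Разбиваем пути на сегменты
--     route_segments = route_path.strip('/').split('/')
--     request_segments = request_path.strip('/').split('/')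
--
--     # Если количество сегментов разное, пути не совпадают
--     if len(route_segments) != len(request_segments):
--         return False
--
--     # Сравниваем каждый сегмент
--     for route_seg, request_seg in zip(route_segments, request_segments):
--         # Если сегмент в конфигурации - параметр (в фигурных скобках)
--         if route_seg.startswith('{') and route_seg.endswith('}'):
--             continue
--         # Если сегменты не совпадают и это не параметр
--         if route_seg != request_seg:
--             return False
--
--     return True
-- ===== SOURCE B (Python) =====
-- def _match_path_with_params(route_path: str, request_path: str) -> bool:
--     def match(rs, qs):
--         if not rs and not qs:
--             return True
--         if not rs or not qs:
--             return False
--         r = rs[0]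
--         return ((r.startswith('{') and r.endswith('}')) or r == qs[0]) and match(rs[1:], qs[1:])
--     return match(route_path.strip('/').split('/'), request_path.strip('/').split('/'))
-- ===== Notes on version B (the rewrite author's own statement) =====
-- stated objective: simpler
-- what changed: Replaces the explicit length check plus zip loop with continue/early-return by a single recursive simultaneous descent over the two segment lists, where a length mismatch falls out of the recursion itself.
import Mathlib
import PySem

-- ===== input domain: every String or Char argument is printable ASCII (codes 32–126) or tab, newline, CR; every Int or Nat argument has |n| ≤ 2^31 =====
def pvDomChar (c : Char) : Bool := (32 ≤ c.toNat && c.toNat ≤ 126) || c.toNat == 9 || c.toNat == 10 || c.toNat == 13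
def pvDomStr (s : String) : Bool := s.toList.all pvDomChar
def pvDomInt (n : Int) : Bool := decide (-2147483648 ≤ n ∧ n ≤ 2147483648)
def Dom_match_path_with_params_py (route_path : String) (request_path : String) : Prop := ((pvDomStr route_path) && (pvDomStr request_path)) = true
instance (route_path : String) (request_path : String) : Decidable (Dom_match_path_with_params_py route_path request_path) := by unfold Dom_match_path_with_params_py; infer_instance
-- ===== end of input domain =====

-- B replaces A's length-check-plus-zip loop by one recursive simultaneous descent over the segment lists (simpler decomposition, same cost).


-- ===== PORT A =====
-- shared transcription of s.strip('/').split('/') (Chars-level split since the sep is nonempty)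
def pvSegs (s : String) : List String :=
  (PySem.Chars.splitOn (PySem.Chars.stripChars s.toList ['/']) ['/']).map String.ofList
def match_path_with_params_py (route_path : String) (request_path : String) : Bool :=
  let route_segments := pvSegs route_path
  let request_segments := pvSegs request_path
  if route_segments.length ≠ request_segments.length then false
  else
    (route_segments.zip request_segments).all (fun p =>
      if PySem.Str.startswith p.1 "{" && PySem.Str.endswith p.1 "}" then true
      else if p.1 ≠ p.2 then false
      else true)

-- ===== PORT B =====
def pvMatchSegs : List String → List String → Bool
  | [], [] => true
  | r :: rs, q :: qs =>
      ((PySem.Str.startswith r "{" && PySem.Str.endswith r "}") || r == q) && pvMatchSegs rs qs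
  | _, _ => false

def match_path_with_params_py_alt (route_path : String) (request_path : String) : Bool :=
  pvMatchSegs (pvSegs route_path)
              (pvSegs request_path)

-- ===== PRECONDITION & SPEC =====
def Spec_match_path_with_params_py (route_path : String) (request_path : String) (out : Bool) : Prop := out = match_path_with_params_py_alt route_path request_path
instance (route_path : String) (request_path : String) (out : Bool) : Decidable (Spec_match_path_with_params_py route_path request_path out) := by unfold Spec_match_path_with_params_py; infer_instance

-- ===== CLAIM (what is proved, stated in full; the proofs are below) =====
def Claim_equal_match_path_with_params_py : Prop := ∀ (route_path : String) (request_path : String), Dom_match_path_with_params_py route_path request_path → Spec_match_path_with_params_py route_path request_path (match_path_with_params_py route_path request_path)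

-- ===== LEMMAS AND PROOFS =====
theorem pvSeg_eq (r q : String) :
    ((PySem.Str.startswith r "{" && PySem.Str.endswith r "}") || r == q) =
      (if PySem.Str.startswith r "{" && PySem.Str.endswith r "}" then true
       else if r ≠ q then false else true) := by
  split_ifs with h1 h2 <;> simp_all

theorem pvMatchSegs_eq (rs : List String) (qs : List String) :
    pvMatchSegs rs qs =
      (if rs.length ≠ qs.length then false
       else (rs.zip qs).all (fun p =>
        if PySem.Str.startswith p.1 "{" && PySem.Str.endswith p.1 "}" then true
        else if p.1 ≠ p.2 then false
        else true)) := by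
  induction rs generalizing qs with
  | nil => cases qs <;> simp [pvMatchSegs]
  | cons r rs ih =>
    cases qs with
    | nil => simp [pvMatchSegs]
    | cons q qs =>
      rw [pvMatchSegs, pvSeg_eq]
      simp only [ih, List.zip_cons_cons, List.all_cons, List.length_cons]
      by_cases h : rs.length = qs.length <;> simp [h]

-- ===== VERDICT (by name: the statement is the Claim_ definition above) =====
theorem match_path_with_params_py_spec : Claim_equal_match_path_with_params_py := by
  intro route_path request_path _
  unfold Spec_match_path_with_params_py match_path_with_params_py match_path_with_params_py_alt
  rw [pvMatchSegs_eq]
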